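-- pv_equiv track=rewrite | github.com/Cissou34730/Azure-Architect-Assistant | scripts/e2e/aaa_e2e_runner.py | _assert_required_state_keys
-- ===== SOURCE A (Python) =====
-- from collections.abc import Iterable
-- from typing import Any, Literal
--
-- def _assert_required_state_keys(state: dict[str, Any], required: Iterable[str]) -> list[str]:
--     # Frontend adapts backend snake_case <-> camelCase. The E2E runner needs to
--     # accept either representation without forcing backend casing changes.
--     alias_map = {
--         "mindMapCoverage": "mind_map_coverage",
--         "traceabilityLinks": "traceability_links",
--         "traceabilityIssues": "traceability_issues",
--         "clarificationQuestions": "clarification_questions",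
--         "candidateArchitectures": "candidate_architectures",
--         "iacArtifacts": "iac_artifacts",
--         "costEstimates": "cost_estimates",
--         "iterationEvents": "iteration_events",
--         "mcpQueries": "mcp_queries",
--         "openQuestions": "open_questions",
--         "lastUpdated": "last_updated",
--     }
--     missing: list[str] = []
--     for key in required:
--         if key in state:
--             continue
--
--         alt = alias_map.get(key)
--         if alt and alt in state:
--             continue
--
--         missing.append(key)
--     return missing
-- ===== SOURCE B (Python) =====
-- def _assert_required_state_keys(state, required):
--     alias_map = {
--         "mindMapCoverage": "mind_map_coverage",
--         "traceabilityLinks": "traceability_links",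
--         "traceabilityIssues": "traceability_issues",
--         "clarificationQuestions": "clarification_questions",
--         "candidateArchitectures": "candidate_architectures",
--         "iacArtifacts": "iac_artifacts",
--         "costEstimates": "cost_estimates",
--         "iterationEvents": "iteration_events",
--         "mcpQueries": "mcp_queries",
--         "openQuestions": "open_questions",
--         "lastUpdated": "last_updated",
--     }
--     # Inverted algorithm: index the positions of each required key once, then
--     # sweep over the STATE keys, knocking out every required position a state
--     # key (directly, or as the snake_case form of a camelCase requirement)
--     # satisfies; the survivors, in order, are the missing keys.
--     inv = {snake: camel for camel, snake in alias_map.items()}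
--     req = list(required)
--     alive = [True] * len(req)
--     pos = {}
--     for i, k in enumerate(req):
--         pos.setdefault(k, []).append(i)
--     for sk in state:
--         for i in pos.get(sk, []):
--             alive[i] = False
--         camel = inv.get(sk)
--         if camel is not None:
--             for i in pos.get(camel, []):
--                 alive[i] = False
--     return [k for k, a in zip(req, alive) if a]
-- ===== Notes on version B (the rewrite author's own statement) =====
-- stated objective: alternative
-- what changed: B inverts the traversal: it builds a position index of the required keys, then sweeps over the STATE keys marking dead every required position each state key satisfies (directly or as the snake_case alias of a camelCase requirement), and returns the surviving keys in order, instead of A's per-required-key membership-and-alias test.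
import Mathlib
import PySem

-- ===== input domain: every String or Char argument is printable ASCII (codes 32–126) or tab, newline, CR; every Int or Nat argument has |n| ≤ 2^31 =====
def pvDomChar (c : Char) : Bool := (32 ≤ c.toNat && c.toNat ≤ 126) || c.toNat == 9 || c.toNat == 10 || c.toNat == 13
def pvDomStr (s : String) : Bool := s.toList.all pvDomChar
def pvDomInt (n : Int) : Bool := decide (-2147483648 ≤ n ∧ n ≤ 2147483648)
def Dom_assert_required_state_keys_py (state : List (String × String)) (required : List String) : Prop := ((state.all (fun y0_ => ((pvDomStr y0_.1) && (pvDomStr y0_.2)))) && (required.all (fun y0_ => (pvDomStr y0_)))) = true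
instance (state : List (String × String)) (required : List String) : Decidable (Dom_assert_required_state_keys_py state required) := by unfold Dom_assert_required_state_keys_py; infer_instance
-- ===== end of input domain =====

-- B inverts the traversal: it indexes the positions of the required keys once, then sweeps over the
-- state keys knocking out every position each state key satisfies (directly or via the alias map),
-- and returns the surviving required keys in order ("alternative", no speed claim).


-- the fixed alias_map literal shared by both Pythons (camelCase -> snake_case)
def pvAliasPairs : List (String × String) :=
  [("mindMapCoverage", "mind_map_coverage"),
   ("traceabilityLinks", "traceability_links"),
   ("traceabilityIssues", "traceability_issues"),
   ("clarificationQuestions", "clarification_questions"),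
   ("candidateArchitectures", "candidate_architectures"),
   ("iacArtifacts", "iac_artifacts"),
   ("costEstimates", "cost_estimates"),
   ("iterationEvents", "iteration_events"),
   ("mcpQueries", "mcp_queries"),
   ("openQuestions", "open_questions"),
   ("lastUpdated", "last_updated")]

-- ===== PORT A =====
-- loop over `required`: `continue` if the key (or its truthy alias) is a key of `state`, else append
def assert_required_state_keys_py (state : List (String × String)) (required : List String) : List String :=
  required.foldl
    (fun missing key =>
      if (state.map Prod.fst).contains key then missing
      else
        match (PySem.Dict.mk pvAliasPairs).get? key with
        | some alt =>
            if decide (alt ≠ "") && (state.map Prod.fst).contains alt then missing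
            else missing ++ [key]
        | none => missing ++ [key])
    []

-- ===== PORT B =====
-- inv = {snake: camel for ...}; pos = positions of each required key; sweep over state keys
-- setting alive[i] = False at every satisfied position; return survivors [k for k, a in zip(req, alive) if a]
def assert_required_state_keys_py_alt (state : List (String × String)) (required : List String) : List String :=
  let inv : PySem.Dict String String :=
    pvAliasPairs.foldl (fun d cs => d.insert cs.2 cs.1) PySem.Dict.empty
  let req := required
  let pos : PySem.Dict String (List Nat) :=
    req.zipIdx.foldl (fun (d : PySem.Dict String (List Nat)) ki => d.modify ki.1 [] (· ++ [ki.2])) PySem.Dict.empty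
  let alive :=
    (state.map Prod.fst).foldl
      (fun a sk =>
        let a := (pos.getD sk []).foldl (fun a i => a.set i false) a
        match inv.get? sk with
        | some camel => (pos.getD camel []).foldl (fun a i => a.set i false) a
        | none => a)
      (List.replicate req.length true)
  ((req.zip alive).filter (fun ka => ka.2)).map (fun ka => ka.1)

-- ===== PRECONDITION & SPEC =====
def Spec_assert_required_state_keys_py (state : List (String × String)) (required : List String) (out : List String) : Prop := out = assert_required_state_keys_py_alt state required
instance (state : List (String × String)) (required : List String) (out : List String) : Decidable (Spec_assert_required_state_keys_py state required out) := by unfold Spec_assert_required_state_keys_py; infer_instance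

-- ===== CLAIM (what is proved, stated in full; the proofs are below) =====
def Claim_equal_assert_required_state_keys_py : Prop := ∀ (state : List (String × String)) (required : List String), Dom_assert_required_state_keys_py state required → Spec_assert_required_state_keys_py state required (assert_required_state_keys_py state required)

-- ===== LEMMAS AND PROOFS =====

-- shorthand for the filter predicate A's loop realises (proof-only helper)
def pvKeepA (state : List (String × String)) (key : String) : Bool :=
  if (state.map Prod.fst).contains key then false
  else
    match (PySem.Dict.mk pvAliasPairs).get? key with
    | some alt => !(decide (alt ≠ "") && (state.map Prod.fst).contains alt)
    | none => true

-- A's append-or-skip loop is a filter by its per-key keep condition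
lemma foldlA_eq_filter (state : List (String × String)) (required : List String) :
    assert_required_state_keys_py state required = required.filter (pvKeepA state) := by
  unfold assert_required_state_keys_py
  have hbody : ∀ (missing : List String) (key : String),
      (if (state.map Prod.fst).contains key then missing
       else
         match (PySem.Dict.mk pvAliasPairs).get? key with
         | some alt =>
             if decide (alt ≠ "") && (state.map Prod.fst).contains alt then missing
             else missing ++ [key]
         | none => missing ++ [key])
      = if pvKeepA state key then missing ++ [key] else missing := by
    intro missing key
    unfold pvKeepA
    by_cases h1 : (state.map Prod.fst).contains key = true
    · simp only [if_pos h1]; simp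
    · cases hg : (PySem.Dict.mk pvAliasPairs).get? key with
      | some alt =>
        by_cases h2 : (decide (alt ≠ "") && (state.map Prod.fst).contains alt) = true
        · simp only [if_neg h1, if_pos h2]; simpa using h2
        · simp only [if_neg h1, if_neg h2]; simpa using h2
      | none => simp only [if_neg h1]; simp
  simp only [hbody]
  exact PySem.List.foldl_append_if_eq_filter _ _ _

-- kill-fold: setting a list of indices to false, pointwise
lemma set_false_fold_get? : ∀ (idxs : List Nat) (a : List Bool) (j : Nat),
    (idxs.foldl (fun a i => a.set i false) a)[j]? =
      (a[j]?).map (fun b => b && !(idxs.contains j)) := by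
  intro idxs
  induction idxs with
  | nil => intro a j; simp
  | cons i rest ih =>
    intro a j
    simp only [List.foldl_cons]
    rw [ih]
    by_cases hij : i = j
    · subst hij
      have hcon : (i :: rest).contains i = true := by simp
      rw [hcon]
      by_cases hlt : i < a.length
      · simp [hlt]
      · have h1 : a[i]? = none := by
          rw [List.getElem?_eq_none_iff]; omega
        have h2 : (a.set i false)[i]? = none := by
          rw [List.getElem?_eq_none_iff]; simpa using (by omega : a.length ≤ i)
        rw [h1, h2]
        simp
    · have hset : (a.set i false)[j]? = a[j]? := List.getElem?_set_ne hij
      rw [hset]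
      have hji : (j == i) = false := by
        simp [Ne.symm hij]
      have hcon : (i :: rest).contains j = rest.contains j := by
        rw [List.contains_cons, hji, Bool.false_or]
      rw [hcon]

-- proof-only names for B's position index and sweep step (definitionally B's code)
def pvPosD (required : List String) : PySem.Dict String (List Nat) :=
  required.zipIdx.foldl (fun d ki => d.modify ki.1 [] (· ++ [ki.2])) PySem.Dict.empty

def pvStep (inv : PySem.Dict String String) (required : List String)
    (a : List Bool) (sk : String) : List Bool :=
  let a' := ((pvPosD required).getD sk []).foldl (fun a i => a.set i false) a
  match inv.get? sk with
  | some camel => ((pvPosD required).getD camel []).foldl (fun a i => a.set i false) a'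
  | none => a'

def pvPosL (required : List String) (key : String) : List Nat :=
  ((required.zipIdx.filter (fun ki => ki.1 == key)).map (fun ki => ki.2))

-- position index built by setdefault-append: getD is exactly the filtered indices
lemma pos_getD (required : List String) (key : String) :
    (pvPosD required).getD key [] = pvPosL required key := by
  unfold pvPosD
  rw [PySem.Dict.getD_foldl_modify_append]
  simp [pvPosL, PySem.Dict.getD_empty]

lemma posL_contains (required : List String) (key : String) (j : Nat) :
    (pvPosL required key).contains j = (required[j]? == some key) := by
  rw [Bool.eq_iff_iff]
  simp only [List.contains_iff_mem, pvPosL, List.mem_map, List.mem_filter, beq_iff_eq]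
  constructor
  · rintro ⟨⟨k, i⟩, ⟨hmem, hk⟩, rfl⟩
    have := (List.mk_mem_zipIdx_iff_getElem?).mp hmem
    simp only at hk this
    rw [this, hk]
  · intro h
    have h' : required[j]? = some key := by
      cases hg : required[j]? with
      | none => rw [hg] at h; cases h
      | some v => rw [hg] at h; simpa using h
    exact ⟨(key, j), ⟨(List.mk_mem_zipIdx_iff_getElem?).mpr h', rfl⟩, rfl⟩

-- the per-state-key kill predicate on a position
def pvKill (inv : PySem.Dict String String) (required : List String) (sk : String) (j : Nat) : Bool :=
  (required[j]? == some sk) ||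
    (match inv.get? sk with
     | some camel => (required[j]? == some camel)
     | none => false)

-- the same predicate keyed by the required key itself
def pvHit (inv : PySem.Dict String String) (sk k : String) : Bool :=
  (k == sk) ||
    (match inv.get? sk with
     | some camel => (k == camel)
     | none => false)

lemma pvKill_eq_pvHit (inv : PySem.Dict String String) (required : List String)
    (j : Nat) (k : String) (hjk : required[j]? = some k) (sk : String) :
    pvKill inv required sk j = pvHit inv sk k := by
  unfold pvKill pvHit
  rw [hjk]
  cases inv.get? sk <;> simp

-- one sweep step, pointwise (two kill-folds)
lemma step_get? (inv : PySem.Dict String String) (required : List String)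
    (a : List Bool) (sk : String) (j : Nat) :
    (pvStep inv required a sk)[j]? = (a[j]?).map (fun b => b && !(pvKill inv required sk j)) := by
  cases hg : inv.get? sk with
  | none =>
    simp only [pvStep, pvKill, hg, set_false_fold_get?, pos_getD, posL_contains]
    simp
  | some camel =>
    simp only [pvStep, pvKill, hg, set_false_fold_get?, pos_getD, posL_contains]
    cases h : a[j]? with
    | none => simp
    | some b => simp [Bool.and_assoc, Bool.not_or]

-- whole sweep over the state keys, pointwise
lemma sweep_get? (inv : PySem.Dict String String) (required : List String) :
    ∀ (sks : List String) (a : List Bool) (j : Nat),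
    (sks.foldl (pvStep inv required) a)[j]?
      = (a[j]?).map (fun b => b && !(sks.any (fun sk => pvKill inv required sk j))) := by
  intro sks
  induction sks with
  | nil => intro a j; simp
  | cons sk rest ih =>
    intro a j
    simp only [List.foldl_cons]
    rw [ih, step_get? inv required a sk j]
    cases h : a[j]? with
    | none => simp
    | some b => simp [Bool.and_assoc, Bool.not_or]

-- B's inv dict is the swapped literal list
lemma inv_eq :
    (pvAliasPairs.foldl (fun d cs => d.insert cs.2 cs.1) (PySem.Dict.empty : PySem.Dict String String))
      = PySem.Dict.mk (pvAliasPairs.map Prod.swap) := by decide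

-- lookup in the swapped dict ↔ pair membership
lemma inv_get?_iff (sk c : String) :
    (PySem.Dict.mk (pvAliasPairs.map Prod.swap) : PySem.Dict String String).get? sk = some c
      ↔ (c, sk) ∈ pvAliasPairs := by
  rw [PySem.Dict.get?_eq_some_iff_mem_items _ sk c (by decide)]
  show (sk, c) ∈ pvAliasPairs.map Prod.swap ↔ (c, sk) ∈ pvAliasPairs
  constructor
  · intro h
    rcases List.mem_map.mp h with ⟨⟨c', sk'⟩, hmem, heq⟩
    simp only [Prod.swap_prod_mk, Prod.mk.injEq] at heq
    obtain ⟨h1, h2⟩ := heq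
    subst h1; subst h2; exact hmem
  · intro h
    exact List.mem_map.mpr ⟨(c, sk), h, rfl⟩

-- A's alias lookup ↔ pair membership (alias keys are distinct)
lemma alias_get?_iff (k alt : String) :
    (PySem.Dict.mk pvAliasPairs).get? k = some alt ↔ (k, alt) ∈ pvAliasPairs := by
  rw [PySem.Dict.get?_eq_some_iff_mem_items _ k alt (by decide)]

-- a state key hits required key k iff k is a state key or an alias pair connects them
lemma hit_cond (k sk : String) :
    pvHit (PySem.Dict.mk (pvAliasPairs.map Prod.swap)) sk k = true
      ↔ (k = sk ∨ (k, sk) ∈ pvAliasPairs) := by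
  unfold pvHit
  rw [Bool.or_eq_true]
  constructor
  · rintro (h | h)
    · left; simpa using h
    · right
      cases hg : (PySem.Dict.mk (pvAliasPairs.map Prod.swap) : PySem.Dict String String).get? sk with
      | none => rw [hg] at h; cases h
      | some camel =>
        rw [hg] at h
        have : k = camel := by simpa using h
        subst this
        exact (inv_get?_iff sk k).mp hg
  · rintro (rfl | h)
    · left; simp
    · right
      rw [(inv_get?_iff sk k).mpr h]
      simp

-- the survivor predicate of B equals A's keep predicate
lemma hit_eq_keep (state : List (String × String)) (k : String) :
    (!((state.map Prod.fst).any (fun sk =>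
        pvHit (PySem.Dict.mk (pvAliasPairs.map Prod.swap)) sk k)))
      = pvKeepA state k := by
  have main : ((state.map Prod.fst).any (fun sk =>
      pvHit (PySem.Dict.mk (pvAliasPairs.map Prod.swap)) sk k)) = true
      ↔ pvKeepA state k = false := by
    simp only [List.any_eq_true, hit_cond]
    constructor
    · rintro ⟨sk, hsk, rfl | hpair⟩
      · unfold pvKeepA
        rw [if_pos (List.contains_iff_mem.mpr hsk)]
      · unfold pvKeepA
        by_cases h1 : (state.map Prod.fst).contains k = true
        · rw [if_pos h1]
        · rw [if_neg h1, (alias_get?_iff k sk).mpr hpair]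
          have hne : sk ≠ "" := (by decide : ∀ cs ∈ pvAliasPairs, cs.2 ≠ "") _ hpair
          simp only [hne, ne_eq, not_false_iff, decide_true, Bool.true_and,
            List.contains_iff_mem.mpr hsk, Bool.not_true]
    · intro hkeep
      unfold pvKeepA at hkeep
      by_cases h1 : (state.map Prod.fst).contains k = true
      · exact ⟨k, List.contains_iff_mem.mp h1, Or.inl rfl⟩
      · rw [if_neg h1] at hkeep
        cases hg : (PySem.Dict.mk pvAliasPairs).get? k with
        | none => rw [hg] at hkeep; cases hkeep
        | some alt =>
          rw [hg] at hkeep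
          have hpair := (alias_get?_iff k alt).mp hg
          have hne : alt ≠ "" := (by decide : ∀ cs ∈ pvAliasPairs, cs.2 ≠ "") _ hpair
          have halt : (state.map Prod.fst).contains alt = true := by
            by_contra hc
            rw [Bool.not_eq_true] at hc
            simp only [hne, ne_eq, not_false_iff, decide_true, Bool.true_and, hc,
              Bool.not_false] at hkeep
            cases hkeep
          exact ⟨alt, List.contains_iff_mem.mp halt, Or.inr hpair⟩
  cases hA : ((state.map Prod.fst).any (fun sk =>
      pvHit (PySem.Dict.mk (pvAliasPairs.map Prod.swap)) sk k)) with
  | true => rw [Bool.not_true]; exact (main.mp hA).symm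
  | false =>
    rw [Bool.not_false]
    cases hK : pvKeepA state k with
    | true => rfl
    | false =>
      have := main.mpr hK
      rw [hA] at this
      cases this

-- zip a list with a pointwise map of itself, keep the survivors
lemma zip_map_filter (g : String → Bool) :
    ∀ (l : List String), ((l.zip (l.map g)).filter (fun ka => ka.2)).map (fun ka => ka.1) = l.filter g := by
  intro l
  induction l with
  | nil => simp
  | cons x xs ih =>
    simp only [List.map_cons, List.zip_cons_cons, List.filter_cons]
    by_cases h : g x = true
    · simp [h, ih]
    · simp only [h]
      simpa [h] using ih

-- ===== VERDICT (by name: the statement is the Claim_ definition above) =====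
theorem assert_required_state_keys_py_spec : Claim_equal_assert_required_state_keys_py := by
  intro state required _
  unfold Spec_assert_required_state_keys_py
  have key : assert_required_state_keys_py_alt state required =
      ((required.zip ((state.map Prod.fst).foldl
          (pvStep (PySem.Dict.mk (pvAliasPairs.map Prod.swap)) required)
          (List.replicate required.length true))).filter (fun ka => ka.2)).map (fun ka => ka.1) := by
    unfold assert_required_state_keys_py_alt
    rw [inv_eq]
    rfl
  rw [key]
  have halive :
      (state.map Prod.fst).foldl
          (pvStep (PySem.Dict.mk (pvAliasPairs.map Prod.swap)) required)
          (List.replicate required.length true)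
      = required.map (fun k => !((state.map Prod.fst).any (fun sk =>
          pvHit (PySem.Dict.mk (pvAliasPairs.map Prod.swap)) sk k))) := by
    apply List.ext_getElem?
    intro j
    rw [sweep_get? _ required (state.map Prod.fst) (List.replicate required.length true) j]
    by_cases hj : j < required.length
    · have hjk : required[j]? = some required[j] := List.getElem?_eq_getElem hj
      rw [List.getElem?_eq_getElem (by simpa using hj), List.getElem?_map,
        List.getElem?_eq_getElem hj]
      simp only [List.getElem_replicate, Option.map_some, Bool.true_and,
        pvKill_eq_pvHit _ required j required[j] hjk]
    · rw [List.getElem?_eq_none (by simpa using (by omega : required.length ≤ j))]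
      rw [List.getElem?_eq_none (by simp; omega)]
      rfl
  rw [halive,
    zip_map_filter (fun k => !((state.map Prod.fst).any (fun sk =>
      pvHit (PySem.Dict.mk (pvAliasPairs.map Prod.swap)) sk k))) required,
    foldlA_eq_filter state required]
  apply List.filter_congr
  intro k _
  exact (hit_eq_keep state k).symm
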